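-- pv_equiv track=rewrite | github.com/2e2a/l-rex | apps/experiment/models.py | _matching_row
-- ===== SOURCE A (Python) =====
-- def _matching_row(row, aggregated_results, columns):
--     match = -1
--     for i, result_row in enumerate(aggregated_results):
--         match = i
--         for col in columns:
--             if result_row[col] != row[col]:
--                 match = -1
--                 break
--         if match >= 0:
--             break
--     return match
-- ===== SOURCE B (Python) =====
-- def _matching_row(row, aggregated_results, columns):
--     index = {}
--     for i, result_row in enumerate(aggregated_results):
--         index.setdefault(tuple(result_row[col] for col in columns), i)
--     return index.get(tuple(row[col] for col in columns), -1)
-- ===== Notes on version B (the rewrite author's own statement) =====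
-- stated objective: alternative
-- what changed: Replaces A's nested early-exiting comparison scan with a single pass that builds a dict keyed by each row's column-value tuple (setdefault keeps the first index) followed by one lookup of the query row's tuple.
-- outside the precondition, e.g. on _matching_row({'a': '1'}, [{'a': '2'}], ['a', 'b']): A returns -1, B raises KeyError
import Mathlib
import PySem

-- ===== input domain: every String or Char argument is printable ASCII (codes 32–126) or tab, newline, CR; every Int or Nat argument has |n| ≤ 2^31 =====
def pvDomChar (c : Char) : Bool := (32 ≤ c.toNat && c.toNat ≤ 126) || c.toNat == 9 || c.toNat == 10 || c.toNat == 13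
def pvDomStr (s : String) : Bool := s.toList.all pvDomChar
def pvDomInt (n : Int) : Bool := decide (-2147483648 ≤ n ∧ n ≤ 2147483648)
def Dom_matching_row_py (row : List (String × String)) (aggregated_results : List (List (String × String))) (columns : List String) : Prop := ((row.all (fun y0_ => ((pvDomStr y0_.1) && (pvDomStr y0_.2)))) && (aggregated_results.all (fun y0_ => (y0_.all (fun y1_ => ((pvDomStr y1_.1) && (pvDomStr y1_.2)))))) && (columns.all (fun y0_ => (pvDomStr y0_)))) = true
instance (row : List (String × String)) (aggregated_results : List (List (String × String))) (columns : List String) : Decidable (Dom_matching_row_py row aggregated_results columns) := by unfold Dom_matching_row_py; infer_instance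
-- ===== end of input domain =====

-- B replaces A's nested early-exiting scan by a one-pass dict index keyed by the column-value
-- tuple (setdefault keeps the first occurrence) followed by a single lookup; objective: alternative.

-- ===== PORT A =====
-- dict lookup result_row[col] / row[col]; getD with default "" is exact whenever the key is
-- present (guaranteed by Pre_; Python raises KeyError otherwise).
def pvLook (d : List (String × String)) (c : String) : String :=
  (PySem.Dict.mk d).getD c ""

-- inner 'for col in columns' loop: m is the current value of 'match' (= i); -1 + break on mismatch
def pvInnerA (rr row : List (String × String)) (cols : List String) (m : Int) : Int :=
  match cols with
  | [] => m
  | c :: cs => if pvLook rr c ≠ pvLook row c then -1 else pvInnerA rr row cs m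

-- outer 'for i, result_row in enumerate(...)' loop with the 'if match >= 0: break'
def pvOuterA (row : List (String × String)) (ag : List (List (String × String))) (cols : List String) (i : Int) : Int :=
  match ag with
  | [] => -1
  | rr :: rest =>
    let m := pvInnerA rr row cols i
    if m ≥ 0 then m else pvOuterA row rest cols (i + 1)

def matching_row_py (row : List (String × String)) (aggregated_results : List (List (String × String))) (columns : List String) : Int :=
  pvOuterA row aggregated_results columns 0

-- ===== PORT B =====
-- tuple(d[col] for col in columns)
def pvKey (d : List (String × String)) (cols : List String) : List String :=
  cols.map (fun c => (PySem.Dict.mk d).getD c "")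

def matching_row_py_alt (row : List (String × String)) (aggregated_results : List (List (String × String))) (columns : List String) : Int :=
  let st := aggregated_results.foldl
    (fun (st : PySem.Dict (List String) Int × Int) rr =>
      (PySem.Dict.setdefault st.1 (pvKey rr columns) st.2, st.2 + 1))
    (PySem.Dict.empty, 0)
  PySem.Dict.getD st.1 (pvKey row columns) (-1)

-- ===== PRECONDITION & SPEC =====
-- Pre_ excludes inputs on which some column name is missing from row or from some aggregated
-- row: there Python A raises KeyError (or, when an earlier column already mismatched, breaks
-- and returns -1 without touching the missing key) while B's up-front key construction raises
-- KeyError, so no common value exists.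
def Pre_matching_row_py (row : List (String × String)) (aggregated_results : List (List (String × String))) (columns : List String) : Prop :=
  ∀ c ∈ columns, c ∈ row.map Prod.fst ∧ ∀ rr ∈ aggregated_results, c ∈ rr.map Prod.fst
instance (row : List (String × String)) (aggregated_results : List (List (String × String))) (columns : List String) : Decidable (Pre_matching_row_py row aggregated_results columns) := by unfold Pre_matching_row_py; infer_instance

def pvWitness_matching_row_py : (List (String × String)) × (List (List (String × String))) × List String :=
  ([("a", "1"), ("b", "2")], [[("a", "9"), ("b", "2")], [("a", "1"), ("b", "2")]], ["a", "b"])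

def Spec_matching_row_py (row : List (String × String)) (aggregated_results : List (List (String × String))) (columns : List String) (out : Int) : Prop := out = matching_row_py_alt row aggregated_results columns
instance (row : List (String × String)) (aggregated_results : List (List (String × String))) (columns : List String) (out : Int) : Decidable (Spec_matching_row_py row aggregated_results columns out) := by unfold Spec_matching_row_py; infer_instance

-- ===== CLAIM (what is proved, stated in full; the proofs are below) =====
def Claim_equal_matching_row_py : Prop := ∀ (row : List (String × String)) (aggregated_results : List (List (String × String))) (columns : List String), Dom_matching_row_py row aggregated_results columns → Pre_matching_row_py row aggregated_results columns → Spec_matching_row_py row aggregated_results columns (matching_row_py row aggregated_results columns)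

-- ===== LEMMAS AND PROOFS =====

-- A's inner loop succeeds (keeps m) exactly when the two key tuples coincide.
theorem pvInnerA_eq (rr row : List (String × String)) (cols : List String) (m : Int) :
    pvInnerA rr row cols m = if pvKey rr cols = pvKey row cols then m else -1 := by
  induction cols with
  | nil => simp [pvInnerA, pvKey]
  | cons c cs ih =>
    simp only [pvInnerA, pvKey, List.map_cons, pvLook] at *
    by_cases h : (PySem.Dict.mk rr).getD c "" = (PySem.Dict.mk row).getD c ""
    · simp [h, ih]
    · simp [h]

-- Loop invariant for B's fold: a lookup in the index built from state (d, i) is d's value for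
-- the query key if present, and otherwise A's scan from counter i.
theorem pvFold_inv (row : List (String × String)) (cols : List String)
    (ag : List (List (String × String))) (d : PySem.Dict (List String) Int) (i : Int)
    (h0 : 0 ≤ i) :
    PySem.Dict.getD
      (ag.foldl (fun (st : PySem.Dict (List String) Int × Int) rr =>
          (PySem.Dict.setdefault st.1 (pvKey rr cols) st.2, st.2 + 1)) (d, i)).1
      (pvKey row cols) (-1)
      = (d.get? (pvKey row cols)).getD (pvOuterA row ag cols i) := by
  induction ag generalizing d i with
  | nil => simp [pvOuterA, PySem.Dict.getD_eq_get?_getD]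
  | cons rr rest ih =>
    simp only [List.foldl_cons, pvOuterA, pvInnerA_eq]
    by_cases hk : pvKey rr cols = pvKey row cols
    · rw [hk]
      rw [ih _ (i + 1) (by omega)]
      rw [PySem.Dict.get?_setdefault_self]
      simp [h0]
    · simp only [if_neg hk, if_neg (by omega : ¬ (-1 : Int) ≥ 0)]
      rw [ih _ (i + 1) (by omega)]
      have hget : (PySem.Dict.setdefault d (pvKey rr cols) i).get? (pvKey row cols)
          = d.get? (pvKey row cols) := by
        by_cases hc : d.contains (pvKey rr cols)
        · rw [PySem.Dict.setdefault_of_contains d i hc]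
        · rw [PySem.Dict.setdefault_of_not_contains d i (by simpa using hc)]
          exact PySem.Dict.get?_insert_of_ne d i (fun h => hk h.symm)
      rw [hget]

-- ===== VERDICT (by name: the statement is the Claim_ definition above) =====
theorem matching_row_py_spec : Claim_equal_matching_row_py := by
  intro row ag cols _ _
  unfold Spec_matching_row_py matching_row_py matching_row_py_alt
  rw [pvFold_inv row cols ag PySem.Dict.empty 0 le_rfl]
  simp
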